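-- pv_equiv track=rewrite | github.com/ivaxi0s/CausalGraph2LLM | src/prompts/multinode/multinode_prompt_util.py | verbose_multinode_graph
-- ===== SOURCE A (Python) =====
-- def verbose_multinode_graph(full_graph):
--     causes_dict = {}
--
--     # Process each statement in full_graph
--     for statement in full_graph:
--         parts = statement.split('causes')
--         x_desc = parts[0].strip().strip('<').strip('>')
--         y_desc = parts[1].strip().strip('<').strip('>')
--
--         if x_desc not in causes_dict:
--             causes_dict[x_desc] = []
--         causes_dict[x_desc].append(y_desc)
--
--     # Generate multi-node description
--     multi_node_descriptions = []
--     for cause, effects in sorted(causes_dict.items()):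
--         effects_str = ', '.join(sorted(effects))
--         multi_node_descriptions.append(f"{cause} causes {effects_str}")
--
--     # Combine descriptions into a single string with better formatting
--     return ". ".join(multi_node_descriptions) + "."
-- ===== SOURCE B (Python) =====
-- def verbose_multinode_graph(full_graph):
--     def parse(statement):
--         parts = statement.split('causes')
--         return (parts[0].strip().strip('<').strip('>'),
--                 parts[1].strip().strip('<').strip('>'))
--
--     pairs = sorted(parse(s) for s in full_graph)
--
--     descriptions = []
--     i = 0
--     n = len(pairs)
--     while i < n:
--         cause = pairs[i][0]
--         j = i + 1
--         while j < n and pairs[j][0] == cause: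
--             j += 1
--         effects_str = ", ".join(e for _, e in pairs[i:j])
--         descriptions.append(f"{cause} causes {effects_str}")
--         i = j
--     return ". ".join(descriptions) + "."
-- ===== Notes on version B (the rewrite author's own statement) =====
-- stated objective: alternative
-- what changed: Replaces A's dict accumulator with per-bucket sorts by parsing to a flat (cause, effect) list, sorting it once lexicographically, and emitting groups in a single pass over consecutive equal causes.
import Mathlib
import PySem

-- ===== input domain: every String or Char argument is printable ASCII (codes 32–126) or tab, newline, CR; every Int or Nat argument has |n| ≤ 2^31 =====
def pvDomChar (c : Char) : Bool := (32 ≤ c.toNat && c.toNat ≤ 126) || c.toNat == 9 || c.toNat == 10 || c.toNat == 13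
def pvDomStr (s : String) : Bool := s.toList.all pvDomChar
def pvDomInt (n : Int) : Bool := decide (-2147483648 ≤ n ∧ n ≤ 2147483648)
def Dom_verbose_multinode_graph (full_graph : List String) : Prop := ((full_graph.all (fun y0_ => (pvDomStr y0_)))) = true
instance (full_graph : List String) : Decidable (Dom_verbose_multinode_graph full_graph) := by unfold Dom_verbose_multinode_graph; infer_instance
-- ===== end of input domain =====

-- B replaces A's dict-accumulate / per-bucket-sort with: parse to flat (cause, effect) pairs,
-- one lexicographic sort, then a single grouping pass over consecutive equal causes (objective: alternative).
-- Both Pythons parse a statement identically; the shared parse step is factored out here.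
def pvParse (stmt : String) : String × String :=
  let parts := (PySem.Str.split? stmt "causes").getD []
  (PySem.Str.stripChars (PySem.Str.stripChars (PySem.Str.strip ((PySem.List.pyGet? parts 0).getD "")) "<") ">",
   PySem.Str.stripChars (PySem.Str.stripChars (PySem.Str.strip ((PySem.List.pyGet? parts 1).getD "")) "<") ">")

-- ===== PORT A =====
-- 'if x not in d: d[x] = []' then 'd[x].append(y)'
def pvStepA (d : PySem.Dict String (List String)) (stmt : String) : PySem.Dict String (List String) :=
  let p := pvParse stmt
  let d1 := if d.contains p.1 then d else d.insert p.1 []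
  d1.modify p.1 [] (fun l => l ++ [p.2])

def verbose_multinode_graph (full_graph : List String) : String :=
  let causes_dict := full_graph.foldl pvStepA PySem.Dict.empty
  -- dict keys are unique, so Python's sort of (key, value) tuples never compares values:
  -- sorted(causes_dict.items()) is its sort by key
  let sorted_items := PySem.List.sorted causes_dict.items (fun q => q.1) false
  let descs := sorted_items.map (fun q =>
    q.1 ++ " causes " ++ PySem.Str.join ", " (PySem.List.sorted q.2 (fun e => e) false))
  PySem.Str.join ". " descs ++ "."

-- ===== PORT B =====
-- the inner while loop: consume the run of pairs sharing the first pair's cause, emit one description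
def pvGroup : List (String × String) → List String
  | [] => []
  | (c, e) :: rest =>
    (c ++ " causes " ++ PySem.Str.join ", " (e :: (rest.takeWhile (fun p => p.1 == c)).map Prod.snd))
      :: pvGroup (rest.dropWhile (fun p => p.1 == c))
termination_by ps => ps.length
decreasing_by
  exact Nat.lt_succ_of_le (List.length_dropWhile_le _ _)

def verbose_multinode_graph_alt (full_graph : List String) : String :=
  let pairs := PySem.List.sorted2 (full_graph.map pvParse) (fun p => p.1) (fun p => p.2) false
  PySem.Str.join ". " (pvGroup pairs) ++ "."

-- ===== PRECONDITION & SPEC =====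
-- Pre_ excludes exactly the statements without the substring 'causes': there parts[1] does not
-- exist and Python A raises IndexError (B raises the same way).
def Pre_verbose_multinode_graph (full_graph : List String) : Prop :=
  ∀ s ∈ full_graph, PySem.Str.isIn "causes" s = true
instance (full_graph : List String) : Decidable (Pre_verbose_multinode_graph full_graph) := by
  unfold Pre_verbose_multinode_graph; infer_instance

def pvWitness_verbose_multinode_graph : List String :=
  ["<b> causes <a>", "b causes c", " a causes b "]

def Spec_verbose_multinode_graph (full_graph : List String) (out : String) : Prop :=
  out = verbose_multinode_graph_alt full_graph
instance (full_graph : List String) (out : String) : Decidable (Spec_verbose_multinode_graph full_graph out) := by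
  unfold Spec_verbose_multinode_graph; infer_instance

-- ===== CLAIM (what is proved, stated in full; the proofs are below) =====
def Claim_equal_verbose_multinode_graph : Prop :=
  ∀ (full_graph : List String), Dom_verbose_multinode_graph full_graph →
    Pre_verbose_multinode_graph full_graph →
    Spec_verbose_multinode_graph full_graph (verbose_multinode_graph full_graph)

-- ===== LEMMAS AND PROOFS =====

-- A's loop body on an already-parsed pair
def pvStepP (d : PySem.Dict String (List String)) (p : String × String) : PySem.Dict String (List String) :=
  PySem.Dict.modify (if d.contains p.1 then d else d.insert p.1 []) p.1 [] (fun l => l ++ [p.2])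

-- the effects recorded for cause c, in input order
def pvE (ps : List (String × String)) (c : String) : List String :=
  (ps.filter (fun p => p.1 == c)).map Prod.snd

def pvItems (ps : List (String × String)) : List (String × List String) :=
  (PySem.List.dedup (ps.map Prod.fst)).map (fun c => (c, pvE ps c))

def pvSortedCauses (ps : List (String × String)) : List String :=
  PySem.List.sorted (PySem.List.dedup (ps.map Prod.fst)) (fun c => c) false

def pvFlat (ps : List (String × String)) : List (String × String) :=
  (pvSortedCauses ps).flatMap (fun c =>
    (PySem.List.sorted (pvE ps c) (fun e => e) false).map (fun e => (c, e)))

theorem pvE_append (ps : List (String × String)) (p : String × String) (c : String) :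
    pvE (ps ++ [p]) c = pvE ps c ++ (if p.1 == c then [p.2] else []) := by
  simp only [pvE, List.filter_append, List.map_append]
  congr 1
  by_cases h : p.1 == c <;> simp [List.filter, h]

theorem pvDedup_append {α : Type} [BEq α] [LawfulBEq α] (l : List α) (x : α) :
    PySem.List.dedup (l ++ [x]) =
      if x ∈ l then PySem.List.dedup l else PySem.List.dedup l ++ [x] := by
  simp only [PySem.List.dedup_eq_ofList, PySem.Set.ofList_eq_foldl, List.foldl_concat]
  rw [← PySem.Set.ofList_eq_foldl]
  show PySem.Set.add _ _ = _
  unfold PySem.Set.add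
  by_cases h : x ∈ l
  · rw [if_pos ((PySem.Set.contains_iff _ _).2 ((PySem.Set.mem_ofList l x).2 h)), if_pos h]
  · rw [if_neg (fun hc => h ((PySem.Set.mem_ofList l x).1 ((PySem.Set.contains_iff _ _).1 hc))),
      if_neg h]

theorem pvKeys_foldl (ps : List (String × String))
    (h : (List.foldl pvStepP PySem.Dict.empty ps).items = pvItems ps) :
    (List.foldl pvStepP PySem.Dict.empty ps).keys = PySem.List.dedup (ps.map Prod.fst) := by
  show (List.foldl pvStepP PySem.Dict.empty ps).items.map Prod.fst = _
  have hid : (Prod.fst ∘ fun c => (c, pvE ps c)) = id := rfl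
  rw [h, pvItems, List.map_map, hid, List.map_id]

theorem pvItems_foldl (ps : List (String × String)) :
    (List.foldl pvStepP PySem.Dict.empty ps).items = pvItems ps := by
  induction ps using List.reverseRecOn with
  | nil => rfl
  | append_singleton ps p ih =>
    rw [List.foldl_concat]
    have hkeys := pvKeys_foldl ps ih
    set d := List.foldl pvStepP PySem.Dict.empty ps with hd
    have hnodup : d.keys.Nodup := by
      rw [hkeys, PySem.List.dedup_eq_ofList]; exact PySem.Set.nodup_ofList _
    have hmemkeys : ∀ c, c ∈ d.keys ↔ c ∈ ps.map Prod.fst := by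
      intro c; rw [hkeys]; exact PySem.List.mem_dedup _ _
    show (PySem.Dict.modify (if d.contains p.1 then d else d.insert p.1 []) p.1 []
      (fun l => l ++ [p.2])).items = pvItems (ps ++ [p])
    by_cases hc : d.contains p.1 = true
    · -- existing cause: Python appends to the bucket
      have hmem : p.1 ∈ ps.map Prod.fst :=
        (hmemkeys p.1).1 ((PySem.Dict.contains_iff_mem_keys d p.1).1 hc)
      have hitem : (p.1, pvE ps p.1) ∈ d.items := by
        rw [ih]
        exact List.mem_map_of_mem ((PySem.List.mem_dedup _ _).2 hmem)
      have hget : d.get? p.1 = some (pvE ps p.1) :=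
        PySem.Dict.get?_of_mem_items d hitem hnodup
      have hgetD : d.getD p.1 [] = pvE ps p.1 := by
        rw [PySem.Dict.getD_eq_get?_getD, hget]; rfl
      rw [if_pos hc]
      unfold PySem.Dict.modify
      rw [hgetD, PySem.Dict.items_insert_of_contains d _ hc, ih]
      simp only [pvItems, List.map_map, List.map_cons, List.map_nil, pvDedup_append, hmem,
        if_true, List.map_append]
      apply List.map_congr_left
      intro c hcmem
      simp only [Function.comp]
      rw [pvE_append]
      by_cases hq : c = p.1
      · subst hq; simp
      · have h1 : (c == p.1) = false := beq_eq_false_iff_ne.2 hq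
        have h2 : (p.1 == c) = false := beq_eq_false_iff_ne.2 (Ne.symm hq)
        simp [h1, h2]
    · -- new cause: d[x] = [] then append
      have hc' : d.contains p.1 = false := by revert hc; cases d.contains p.1 <;> simp
      have hnm : p.1 ∉ ps.map Prod.fst := fun hm =>
        hc ((PySem.Dict.contains_iff_mem_keys d p.1).2 ((hmemkeys p.1).2 hm))
      rw [if_neg hc]
      set d1 := d.insert p.1 [] with hd1
      have hitems1 : d1.items = d.items ++ [(p.1, [])] :=
        PySem.Dict.items_insert_of_not_contains d _ hc'
      have hnodup1 : d1.keys.Nodup := PySem.Dict.nodup_keys_insert d p.1 [] hnodup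
      have hget1 : d1.get? p.1 = some [] := by
        apply PySem.Dict.get?_of_mem_items d1 _ hnodup1
        rw [hitems1]; simp
      have hc1 : d1.contains p.1 = true := PySem.Dict.contains_insert_self d p.1 []
      unfold PySem.Dict.modify
      rw [PySem.Dict.getD_eq_get?_getD, hget1]
      rw [PySem.Dict.items_insert_of_contains d1 _ hc1, hitems1, ih]
      simp only [List.map_append, pvItems, List.map_map, List.map_cons, List.map_nil,
        Option.getD_some]
      rw [pvDedup_append, if_neg hnm]
      simp only [List.map_append]
      congr 1
      · apply List.map_congr_left
        intro c hcmem
        have hcm : c ∈ ps.map Prod.fst := (PySem.List.mem_dedup _ _).1 hcmem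
        have hne : (c == p.1) = false := beq_eq_false_iff_ne.2 (fun he => hnm (he ▸ hcm))
        have hne' : (p.1 == c) = false := beq_eq_false_iff_ne.2 (fun he => hnm (he ▸ hcm))
        simp only [Function.comp, hne, pvE_append, hne']
        simp
      · simp only [List.map_cons, List.map_nil]
        rw [pvE_append]
        have hEnil : pvE ps p.1 = [] := by
          simp only [pvE, List.map_eq_nil_iff, List.filter_eq_nil_iff]
          intro q hq hbeq
          exact hnm (eq_of_beq hbeq ▸ List.mem_map_of_mem hq)
        simp [hEnil]

theorem pvSortedItems (ps : List (String × String)) :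
    PySem.List.sorted (pvItems ps) (fun q => q.1) false
      = (pvSortedCauses ps).map (fun c => (c, pvE ps c)) := by
  apply PySem.List.sorted_eq_of_perm_of_pairwise_lt
  · exact ((PySem.List.sorted_perm _ _ _).map _).trans (by rw [pvItems])
  · rw [List.pairwise_map]
    have h := PySem.List.sorted_ofList_pairwise_lt (ps.map Prod.fst)
    rw [← PySem.List.dedup_eq_ofList] at h
    exact h

-- generic pairwise preservation for Python's insertion sort
theorem pvInsertBy_pairwise {α : Type} (R : α → α → Prop) (before : α → α → Bool)
    (htrans : ∀ a b c, R a b → R b c → R a c)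
    (hb : ∀ a b, before a b = true → R a b)
    (hnb : ∀ a b, before a b = false → R b a)
    (x : α) (ys : List α) (h : ys.Pairwise R) :
    (PySem.List.insertBy before x ys).Pairwise R := by
  induction ys with
  | nil => simp [PySem.List.insertBy]
  | cons y ys ih =>
    rw [List.pairwise_cons] at h
    show (if before x y = true then x :: y :: ys else y :: PySem.List.insertBy before x ys).Pairwise R
    by_cases hxy : before x y = true
    · rw [if_pos hxy]
      refine List.Pairwise.cons ?_ (List.Pairwise.cons h.1 h.2)
      intro z hz
      rcases List.mem_cons.1 hz with rfl | hz'
      · exact hb _ _ hxy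
      · exact htrans _ _ _ (hb _ _ hxy) (h.1 z hz')
    · rw [if_neg hxy]
      refine List.Pairwise.cons ?_ (ih h.2)
      intro z hz
      rcases (PySem.List.insertBy_mem_iff _ _ _ _).1 hz with hzx | hz'
      · rw [hzx]
        exact hnb _ _ (by revert hxy; cases before x y <;> simp)
      · exact h.1 z hz'

theorem pvFoldl_insertBy_pairwise {α : Type} (R : α → α → Prop) (before : α → α → Bool)
    (htrans : ∀ a b c, R a b → R b c → R a c)
    (hb : ∀ a b, before a b = true → R a b)
    (hnb : ∀ a b, before a b = false → R b a)
    (xs : List α) (acc : List α) (h : acc.Pairwise R) :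
    (xs.foldl (fun acc x => PySem.List.insertBy before x acc) acc).Pairwise R := by
  induction xs generalizing acc with
  | nil => exact h
  | cons x xs ih => exact ih _ (pvInsertBy_pairwise R before htrans hb hnb x acc h)

-- the lexicographic order on (cause, effect) pairs: Python's tuple '<='
def pvLe (a b : String × String) : Prop := a.1 < b.1 ∨ (a.1 = b.1 ∧ a.2 ≤ b.2)

theorem pvLe_trans (a b c : String × String) : pvLe a b → pvLe b c → pvLe a c := by
  rintro (h1 | ⟨h1, h1'⟩) (h2 | ⟨h2, h2'⟩)
  · exact Or.inl (lt_trans h1 h2)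
  · exact Or.inl (h2 ▸ h1)
  · exact Or.inl (h1 ▸ h2)
  · exact Or.inr ⟨h1.trans h2, le_trans h1' h2'⟩

theorem pvLe_antisymm (a b : String × String) : pvLe a b → pvLe b a → a = b := by
  rintro (h1 | ⟨h1, h1'⟩) (h2 | ⟨h2, h2'⟩)
  · exact absurd h2 (lt_asymm h1)
  · exact absurd h1 (h2 ▸ lt_irrefl _)
  · exact absurd h2 (h1 ▸ lt_irrefl _)
  · exact Prod.ext_iff.2 ⟨h1, le_antisymm h1' h2'⟩

theorem pvSorted2_pairwise (ps : List (String × String)) :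
    (PySem.List.sorted2 ps (fun p => p.1) (fun p => p.2) false).Pairwise pvLe := by
  have hform : PySem.List.sorted2 ps (fun p => p.1) (fun p => p.2) false
      = List.foldl (fun acc x => PySem.List.insertBy
          (fun a b => decide (a.1 < b.1) || (!decide (b.1 < a.1) && decide (a.2 < b.2))) x acc)
          [] ps := rfl
  rw [hform]
  apply pvFoldl_insertBy_pairwise pvLe _ pvLe_trans
  · intro a b h
    simp only [Bool.or_eq_true, Bool.and_eq_true, Bool.not_eq_true', decide_eq_true_eq,
      decide_eq_false_iff_not] at h
    rcases h with h | ⟨h1, h2⟩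
    · exact Or.inl h
    · rcases lt_or_eq_of_le (not_lt.1 h1) with h3 | h3
      · exact Or.inl h3
      · exact Or.inr ⟨h3, le_of_lt h2⟩
  · intro a b h
    simp only [Bool.or_eq_false_iff, Bool.and_eq_false_iff, Bool.not_eq_false',
      decide_eq_true_eq, decide_eq_false_iff_not] at h
    rcases h with ⟨h1, h2 | h2⟩
    · exact Or.inl h2
    · rcases lt_or_eq_of_le (not_lt.1 h1) with h3 | h3
      · exact Or.inl h3
      · exact Or.inr ⟨h3, not_lt.1 h2⟩
  · exact List.Pairwise.nil

theorem pvSortedCauses_pairwise (ps : List (String × String)) :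
    (pvSortedCauses ps).Pairwise (fun a b => a < b) := by
  unfold pvSortedCauses
  rw [PySem.List.dedup_eq_ofList]
  exact PySem.List.sorted_ofList_pairwise_lt _

theorem pvFlat_pairwise (ps : List (String × String)) : (pvFlat ps).Pairwise pvLe := by
  unfold pvFlat
  rw [List.pairwise_flatMap]
  constructor
  · intro c _
    rw [List.pairwise_map]
    exact (PySem.List.sorted_pairwise (pvE ps c) (fun e => e)).imp
      (fun h => Or.inr ⟨rfl, h⟩)
  · refine (pvSortedCauses_pairwise ps).imp ?_
    intro a b hab x hx y hy
    obtain ⟨e, _, rfl⟩ := List.mem_map.1 hx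
    obtain ⟨e', _, rfl⟩ := List.mem_map.1 hy
    exact Or.inl hab

theorem pvFlatMap_congr {α β : Type} (l : List α) (f g : α → List β)
    (h : ∀ a ∈ l, f a = g a) : l.flatMap f = l.flatMap g := by
  induction l with
  | nil => rfl
  | cons x l ih =>
    simp only [List.flatMap_cons, h x List.mem_cons_self,
      ih (fun a ha => h a (List.mem_cons_of_mem _ ha))]

theorem pvPartition_perm (ks : List String) (ps : List (String × String))
    (hk : ks.Nodup) (hall : ∀ p ∈ ps, p.1 ∈ ks) :
    (ks.flatMap (fun c => ps.filter (fun p => p.1 == c))).Perm ps := by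
  induction ks generalizing ps with
  | nil =>
    have : ps = [] := List.eq_nil_iff_forall_not_mem.2 (fun p hp => absurd (hall p hp) (by simp))
    subst this; rfl
  | cons k ks ih =>
    rw [List.flatMap_cons]
    rw [List.nodup_cons] at hk
    have hcong : ks.flatMap (fun c => ps.filter (fun p => p.1 == c))
        = ks.flatMap (fun c => (ps.filter (fun p => !(p.1 == k))).filter (fun p => p.1 == c)) := by
      apply pvFlatMap_congr
      intro c hc
      rw [List.filter_filter]
      apply List.filter_congr
      intro p _
      by_cases hpc : (p.1 == c) = true
      · have : (p.1 == k) = false :=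
          beq_eq_false_iff_ne.2 (fun he => hk.1 (he ▸ eq_of_beq hpc ▸ hc))
        simp [hpc, this]
      · simp only [Bool.not_eq_true] at hpc
        simp [hpc]
    rw [hcong]
    have hrest := ih (ps.filter (fun p => !(p.1 == k))) hk.2 (by
      intro p hp
      have hmem := List.mem_of_mem_filter hp
      have hne : (p.1 == k) = false := by
        have := List.of_mem_filter hp
        revert this; cases p.1 == k <;> simp
      rcases List.mem_cons.1 (hall p hmem) with he | he
      · exact absurd (beq_iff_eq.2 he) (by rw [hne]; simp)
      · exact he)
    exact List.Perm.trans (List.Perm.append_left _ hrest) (List.filter_append_perm _ ps)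

theorem pvGroup_inner_eq (ps : List (String × String)) (c : String) :
    ((pvE ps c).map (fun e => (c, e))) = ps.filter (fun p => p.1 == c) := by
  simp only [pvE, List.map_map]
  have hpt : ∀ p ∈ ps.filter (fun q => q.1 == c), ((fun e => (c, e)) ∘ Prod.snd) p = id p := by
    intro p hp
    have hb := List.of_mem_filter hp
    exact Prod.ext_iff.2 ⟨(eq_of_beq hb).symm, rfl⟩
  rw [List.map_congr_left hpt, List.map_id]

theorem pvFlat_perm (ps : List (String × String)) : (pvFlat ps).Perm ps := by
  unfold pvFlat
  have h1 : ((pvSortedCauses ps).flatMap (fun c =>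
      (PySem.List.sorted (pvE ps c) (fun e => e) false).map (fun e => (c, e)))).Perm
      ((PySem.List.dedup (ps.map Prod.fst)).flatMap (fun c => ps.filter (fun p => p.1 == c))) := by
    apply List.Perm.flatMap (PySem.List.sorted_perm _ _ _)
    intro c _
    exact (((PySem.List.sorted_perm (pvE ps c) (fun e => e) false).map _).trans
      (by rw [pvGroup_inner_eq]))
  refine h1.trans (pvPartition_perm _ ps ?_ ?_)
  · rw [PySem.List.dedup_eq_ofList]; exact PySem.Set.nodup_ofList _
  · intro p hp
    exact (PySem.List.mem_dedup _ _).2 (List.mem_map_of_mem hp)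

theorem pvSorted2_eq (ps : List (String × String)) :
    PySem.List.sorted2 ps (fun p => p.1) (fun p => p.2) false = pvFlat ps :=
  List.Perm.eq_of_pairwise (fun a b _ _ => pvLe_antisymm a b)
    (pvSorted2_pairwise ps) (pvFlat_pairwise ps)
    ((PySem.List.sorted2_perm ps _ _ false).trans (pvFlat_perm ps).symm)

theorem pvSpan {α : Type} (p : α → Bool) (l1 l2 : List α)
    (h1 : ∀ x ∈ l1, p x = true) (h2 : ∀ x ∈ l2, p x = false) :
    (l1 ++ l2).takeWhile p = l1 ∧ (l1 ++ l2).dropWhile p = l2 := by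
  induction l1 with
  | nil =>
    simp only [List.nil_append]
    cases l2 with
    | nil => simp
    | cons y l2 =>
      have hy := h2 y List.mem_cons_self
      exact ⟨by rw [List.takeWhile_cons, hy]; rfl, by rw [List.dropWhile_cons, hy]; rfl⟩
  | cons x l1 ih =>
    have hx := h1 x List.mem_cons_self
    have ih' := ih (fun z hz => h1 z (List.mem_cons_of_mem _ hz))
    simp only [List.cons_append, List.takeWhile_cons, List.dropWhile_cons, hx]
    simp [ih'.1, ih'.2]

theorem pvGroup_flatMap (cs : List String) (E : String → List String)
    (hlt : cs.Pairwise (fun a b => a < b)) (hne : ∀ c ∈ cs, E c ≠ []) :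
    pvGroup (cs.flatMap (fun c => (E c).map (fun e => (c, e))))
      = cs.map (fun c => c ++ " causes " ++ PySem.Str.join ", " (E c)) := by
  induction cs with
  | nil => simp [pvGroup]
  | cons c cs ih =>
    rw [List.pairwise_cons] at hlt
    obtain ⟨e0, es, hEc⟩ : ∃ e0 es, E c = e0 :: es := by
      cases hE : E c with
      | nil => exact absurd hE (hne c List.mem_cons_self)
      | cons e0 es => exact ⟨e0, es, rfl⟩
    rw [List.flatMap_cons, hEc, List.map_cons, List.cons_append, pvGroup]
    have hspan := pvSpan (fun p => p.1 == c) (es.map (fun e => (c, e)))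
      (cs.flatMap (fun c' => (E c').map (fun e => (c', e))))
      (by rintro x hx; obtain ⟨e, _, rfl⟩ := List.mem_map.1 hx; simp)
      (by
        intro q hq
        obtain ⟨c', hc', hq'⟩ := List.mem_flatMap.1 hq
        obtain ⟨e', _, rfl⟩ := List.mem_map.1 hq'
        exact beq_eq_false_iff_ne.2 (ne_of_gt (hlt.1 c' hc')))
    rw [hspan.1, hspan.2, List.map_cons]
    congr 1
    · rw [List.map_map]
      have hsnd : (Prod.snd ∘ (fun e => (c, e)) : String → String) = id := rfl
      rw [hsnd, List.map_id, hEc]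
    · exact ih hlt.2 (fun c' hc' => hne c' (List.mem_cons_of_mem _ hc'))

theorem pvB_eq (ps : List (String × String)) :
    pvGroup (pvFlat ps)
      = (pvSortedCauses ps).map (fun c =>
          c ++ " causes " ++ PySem.Str.join ", "
            (PySem.List.sorted (pvE ps c) (fun e => e) false)) := by
  unfold pvFlat
  apply pvGroup_flatMap _ _ (pvSortedCauses_pairwise ps)
  intro c hc
  have hcmem : c ∈ ps.map Prod.fst := by
    have := (PySem.List.mem_sorted _ _ _ _).1 hc
    exact (PySem.List.mem_dedup _ _).1 this
  rw [Ne, PySem.List.sorted_eq_nil_iff]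
  intro hnil
  obtain ⟨p, hp, rfl⟩ := List.mem_map.1 hcmem
  have : p ∈ ps.filter (fun q => q.1 == p.1) := List.mem_filter.2 ⟨hp, by simp⟩
  rw [pvE] at hnil
  simp only [List.map_eq_nil_iff, List.filter_eq_nil_iff] at hnil
  exact hnil p hp (by simp)

-- ===== VERDICT (by name: the statement is the Claim_ definition above) =====
theorem verbose_multinode_graph_spec : Claim_equal_verbose_multinode_graph := by
  intro fg _ _
  show verbose_multinode_graph fg = verbose_multinode_graph_alt fg
  have hfold : List.foldl pvStepA PySem.Dict.empty fg
      = List.foldl pvStepP PySem.Dict.empty (fg.map pvParse) := by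
    rw [List.foldl_map]; rfl
  show PySem.Str.join ". "
      ((PySem.List.sorted (List.foldl pvStepA PySem.Dict.empty fg).items (fun q => q.1) false).map
        (fun q => q.1 ++ " causes " ++ PySem.Str.join ", " (PySem.List.sorted q.2 (fun e => e) false)))
      ++ "."
    = PySem.Str.join ". "
      (pvGroup (PySem.List.sorted2 (fg.map pvParse) (fun p => p.1) (fun p => p.2) false)) ++ "."
  rw [hfold, pvItems_foldl, pvSortedItems, pvSorted2_eq, pvB_eq, List.map_map]
  rfl
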